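-- pv_equiv track=rewrite | github.com/mgilady99/lottery-filter | app.py | apply_consecutive_filter
-- ===== SOURCE A (Python) =====
-- def apply_consecutive_filter(combo, max_consecutive):
--     sorted_combo = sorted(combo)
--     consecutive_count = 1
--     current_max = 1
--
--     for i in range(1, len(sorted_combo)):
--         if sorted_combo[i] == sorted_combo[i-1] + 1:
--             consecutive_count += 1
--             current_max = max(current_max, consecutive_count)
--         else:
--             consecutive_count = 1
--
--     return current_max <= max_consecutive
-- ===== SOURCE B (Python) =====
-- def apply_consecutive_filter(combo, max_consecutive):
--     s = sorted(combo)
--     cuts = [i for i, (a, b) in enumerate(zip(s, s[1:]), 1) if b != a + 1] + [len(s)]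
--     longest, prev = 1, 0
--     for c in cuts:
--         longest, prev = max(longest, c - prev), c
--     return longest <= max_consecutive
-- ===== Notes on version B (the rewrite author's own statement) =====
-- stated objective: idiomatic
-- what changed: Replaces the running-counter-with-reset scan by a breakpoint decomposition: list the cut positions where the sorted sequence fails to increase by exactly 1, then take the largest gap between consecutive cuts as the longest run.
import Mathlib
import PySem

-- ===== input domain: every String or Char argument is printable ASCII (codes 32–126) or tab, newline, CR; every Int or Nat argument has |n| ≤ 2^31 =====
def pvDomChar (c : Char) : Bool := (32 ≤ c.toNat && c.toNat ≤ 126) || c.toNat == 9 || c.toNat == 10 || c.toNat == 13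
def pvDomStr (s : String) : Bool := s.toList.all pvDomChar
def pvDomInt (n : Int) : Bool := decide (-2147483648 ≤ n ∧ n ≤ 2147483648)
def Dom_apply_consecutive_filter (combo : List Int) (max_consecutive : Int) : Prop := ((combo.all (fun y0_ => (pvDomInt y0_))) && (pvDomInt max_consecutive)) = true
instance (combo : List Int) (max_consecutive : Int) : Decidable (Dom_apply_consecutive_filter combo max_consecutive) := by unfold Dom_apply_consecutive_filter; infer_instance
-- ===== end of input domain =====

-- B replaces A's running-counter-with-reset scan by a breakpoint decomposition (cut
-- positions of the sorted list, then the maximal gap between cuts); objective: idiomatic.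

-- ===== PORT A =====
def apply_consecutive_filter (combo : List Int) (max_consecutive : Int) : Bool :=
  let sorted_combo := PySem.List.sorted combo (fun x => x) false
  let st := (PySem.List.pyRange 1 (sorted_combo.length : Int) 1).foldl
    (fun (p : Int × Int) i =>
      match PySem.List.pyGet? sorted_combo i, PySem.List.pyGet? sorted_combo (i - 1) with
      | some a, some b => if a = b + 1 then (p.1 + 1, max p.2 (p.1 + 1)) else (1, p.2)
      | _, _ => p)   -- unreachable: i and i-1 are always in range for i ∈ range(1, len)
    (1, 1)
  decide (st.2 ≤ max_consecutive)

-- ===== PORT B =====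
def apply_consecutive_filter_alt (combo : List Int) (max_consecutive : Int) : Bool :=
  let s := PySem.List.sorted combo (fun x => x) false
  let cuts := ((PySem.List.enumerate (s.zip (s.drop 1)) 1).filterMap
      (fun p => if p.2.2 ≠ p.2.1 + 1 then some p.1 else none)) ++ [(s.length : Int)]
  let st := cuts.foldl (fun (q : Int × Int) c => (max q.1 (c - q.2), c)) (1, 0)
  decide (st.1 ≤ max_consecutive)

-- ===== PRECONDITION & SPEC =====
def Spec_apply_consecutive_filter (combo : List Int) (max_consecutive : Int) (out : Bool) : Prop := out = apply_consecutive_filter_alt combo max_consecutive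
instance (combo : List Int) (max_consecutive : Int) (out : Bool) : Decidable (Spec_apply_consecutive_filter combo max_consecutive out) := by unfold Spec_apply_consecutive_filter; infer_instance

-- ===== CLAIM (what is proved, stated in full; the proofs are below) =====
def Claim_equal_apply_consecutive_filter : Prop := ∀ (combo : List Int) (max_consecutive : Int), Dom_apply_consecutive_filter combo max_consecutive → Spec_apply_consecutive_filter combo max_consecutive (apply_consecutive_filter combo max_consecutive)

-- ===== LEMMAS AND PROOFS =====

/-- Adjacent pairs of a list (what A's indexed loop reads and what B zips). -/
def pvPairs (s : List Int) : List (Int × Int) := s.zip (s.drop 1)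

/-- A's loop body, applied to the pair (s[i-1], s[i]). -/
def pvStepA (p : Int × Int) (q : Int × Int) : Int × Int :=
  if q.2 = q.1 + 1 then (p.1 + 1, max p.2 (p.1 + 1)) else (1, p.2)

/-- B's loop body over cut positions. -/
def pvStepB (q : Int × Int) (c : Int) : Int × Int := (max q.1 (c - q.2), c)

/-- B's cut positions, pairs enumerated from k. -/
def pvCuts (k : Int) (ps : List (Int × Int)) : List Int :=
  (PySem.List.enumerate ps k).filterMap (fun p => if p.2.2 ≠ p.2.1 + 1 then some p.1 else none)

theorem pvPairs_concat (u : List Int) (y x : Int) :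
    pvPairs (u ++ [y] ++ [x]) = pvPairs (u ++ [y]) ++ [(y, x)] := by
  induction u with
  | nil => rfl
  | cons a u ih =>
    cases u with
    | nil => rfl
    | cons b u => simpa [pvPairs] using ih

theorem pvCuts_cons (k a b : Int) (ps : List (Int × Int)) :
    pvCuts k ((a, b) :: ps) = (if b ≠ a + 1 then [k] else []) ++ pvCuts (k + 1) ps := by
  simp only [pvCuts, PySem.List.enumerate_cons, List.filterMap_cons]
  split_ifs <;> simp_all

/-- A's indexed loop over range(1, len s) is the fold of `pvStepA` over the adjacent pairs. -/
theorem pvFoldA_range (s : List Int) (init : Int × Int) :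
    (PySem.List.pyRange 1 (s.length : Int) 1).foldl
      (fun (p : Int × Int) i =>
        match PySem.List.pyGet? s i, PySem.List.pyGet? s (i - 1) with
        | some a, some b => if a = b + 1 then (p.1 + 1, max p.2 (p.1 + 1)) else (1, p.2)
        | _, _ => p) init
    = (pvPairs s).foldl pvStepA init := by
  induction s using List.reverseRecOn generalizing init with
  | nil =>
    rw [show ((([] : List Int).length : Int)) = 0 from rfl,
      PySem.List.pyRange_one_eq_nil (by norm_num)]
    rfl
  | append_singleton u x ih =>
    rcases u.eq_nil_or_concat with rfl | ⟨t, y, rfl⟩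
    · rw [show ((([] : List Int) ++ [x]).length : Int) = 1 from rfl,
        PySem.List.pyRange_one_eq_nil (by norm_num)]
      rfl
    · simp only [List.concat_eq_append] at ih ⊢
      have hlen : (((t ++ [y] ++ [x]).length : Int)) = ((t ++ [y]).length : Int) + 1 := by
        simp only [List.length_append, List.length_cons, List.length_nil]; push_cast; ring
      rw [hlen, PySem.List.pyRange_one_succ_right (by simp only [List.length_append, List.length_cons, List.length_nil]; push_cast; omega), List.foldl_append]
      have hcongr : ∀ (p : Int × Int) (i : Int), i ∈ PySem.List.pyRange 1 ((t ++ [y]).length : Int) 1 →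
          (fun (p : Int × Int) i =>
            match PySem.List.pyGet? (t ++ [y] ++ [x]) i, PySem.List.pyGet? (t ++ [y] ++ [x]) (i - 1) with
            | some a, some b => if a = b + 1 then (p.1 + 1, max p.2 (p.1 + 1)) else (1, p.2)
            | _, _ => p) p i
          = (fun (p : Int × Int) i =>
            match PySem.List.pyGet? (t ++ [y]) i, PySem.List.pyGet? (t ++ [y]) (i - 1) with
            | some a, some b => if a = b + 1 then (p.1 + 1, max p.2 (p.1 + 1)) else (1, p.2)
            | _, _ => p) p i := by
        intro p i hi
        rw [PySem.List.mem_pyRange_one] at hi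
        obtain ⟨hi1, hi2⟩ := hi
        have h1 : PySem.List.pyGet? (t ++ [y] ++ [x]) i = PySem.List.pyGet? (t ++ [y]) i := by
          rw [PySem.List.pyGet?_of_nonneg _ (by omega), PySem.List.pyGet?_of_nonneg _ (by omega),
            List.getElem?_append_left (by simp only [List.length_append, List.length_cons, List.length_nil] at hi2 ⊢; omega)]
        have h2 : PySem.List.pyGet? (t ++ [y] ++ [x]) (i - 1) = PySem.List.pyGet? (t ++ [y]) (i - 1) := by
          rw [PySem.List.pyGet?_of_nonneg _ (by omega), PySem.List.pyGet?_of_nonneg _ (by omega),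
            List.getElem?_append_left (by simp only [List.length_append, List.length_cons, List.length_nil] at hi2 ⊢; omega)]
        simp only [h1, h2]
      rw [PySem.List.foldl_congr_mem _ _ _ _ hcongr, ih]
      have hx : PySem.List.pyGet? (t ++ [y] ++ [x]) (((t ++ [y]).length : Nat) : Int) = some x := by
        rw [PySem.List.pyGet?_natCast, List.getElem?_concat_length]
      have hy1 : ((((t ++ [y]).length : Nat) : Int)) - 1 = ((t.length : Nat) : Int) := by
        simp only [List.length_append, List.length_cons, List.length_nil]; push_cast; ring
      have hy : PySem.List.pyGet? (t ++ [y] ++ [x]) ((((t ++ [y]).length : Nat) : Int) - 1) = some y := by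
        rw [hy1, PySem.List.pyGet?_natCast,
          List.getElem?_append_left (by simp), List.getElem?_concat_length]
      rw [pvPairs_concat, List.foldl_append]
      simp only [hx, hy, List.foldl_cons, List.foldl_nil, pvStepA]

/-- Invariant relating A's (count, best) scan to B's (longest, prev) fold over the cuts:
    starting with count c and best `max L c`, A's final best is the max of B's longest and
    A's final count, and B's prev tracks the start of A's current run. -/
theorem pvCore (ps : List (Int × Int)) :
    ∀ (k c L : Int), 1 ≤ c →
      1 ≤ (ps.foldl pvStepA (c, max L c)).1
      ∧ (ps.foldl pvStepA (c, max L c)).2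
          = max ((pvCuts k ps).foldl pvStepB (L, k - c)).1 (ps.foldl pvStepA (c, max L c)).1
      ∧ ((pvCuts k ps).foldl pvStepB (L, k - c)).2 = k + ps.length - (ps.foldl pvStepA (c, max L c)).1 := by
  induction ps with
  | nil =>
    intro k c L hc
    refine ⟨hc, ?_, ?_⟩ <;>
      simp [pvCuts, PySem.List.enumerate_nil]
  | cons q ps ih =>
    rcases q with ⟨a, b⟩
    intro k c L hc
    rw [pvCuts_cons, List.foldl_cons]
    by_cases hab : b = a + 1
    · subst hab
      rw [show pvStepA (c, max L c) (a, a + 1) = (c + 1, max L (c + 1)) from by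
            simp [pvStepA],
        show (if a + 1 ≠ a + 1 then [k] else []) = ([] : List Int) from by simp,
        List.nil_append,
        show (L, k - c) = (L, (k + 1) - (c + 1)) from by norm_num]
      obtain ⟨h1, h2, h3⟩ := ih (k + 1) (c + 1) L (by omega)
      exact ⟨h1, h2, by rw [h3]; simp only [List.length_cons]; push_cast; ring⟩
    · rw [show pvStepA (c, max L c) (a, b) = (1, max (max L c) 1) from by
            simp [pvStepA, hab, Prod.ext_iff]; omega,
        show (if b ≠ a + 1 then [k] else []) = [k] from by simp [hab],
        List.cons_append, List.nil_append, List.foldl_cons,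
        show pvStepB (L, k - c) k = (max L c, (k + 1) - 1) from by
          simp [pvStepB]]
      obtain ⟨h1, h2, h3⟩ := ih (k + 1) 1 (max L c) le_rfl
      exact ⟨h1, h2, by rw [h3]; simp only [List.length_cons]; push_cast; ring⟩

-- ===== VERDICT (by name: the statement is the Claim_ definition above) =====
theorem apply_consecutive_filter_spec : Claim_equal_apply_consecutive_filter := by
  intro combo m _
  unfold Spec_apply_consecutive_filter
  show apply_consecutive_filter combo m = apply_consecutive_filter_alt combo m
  rw [show apply_consecutive_filter_alt combo m
      = decide ((((pvCuts 1 (pvPairs (PySem.List.sorted combo (fun x => x) false)))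
          ++ [((PySem.List.sorted combo (fun x => x) false).length : Int)]).foldl pvStepB (1, 0)).1 ≤ m)
    from rfl]
  show decide (((PySem.List.pyRange 1 ((PySem.List.sorted combo (fun x => x) false).length : Int) 1).foldl _ (1, 1)).2 ≤ m) = _
  rw [pvFoldA_range]
  generalize PySem.List.sorted combo (fun x => x) false = s
  rcases s.eq_nil_or_concat with rfl | ⟨t, x, rfl⟩
  · rfl
  · simp only [List.concat_eq_append]
    have hps : ((pvPairs (t ++ [x])).length : Int) = ((t ++ [x]).length : Int) - 1 := by
      simp only [pvPairs, List.length_zip, List.length_drop, List.length_append,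
        List.length_cons, List.length_nil]
      omega
    obtain ⟨h1, h2, h3⟩ := pvCore (pvPairs (t ++ [x])) 1 1 1 le_rfl
    rw [show ((1 : Int), (1 : Int)) = ((1 : Int), max (1 : Int) 1) from by norm_num,
      show ((1 : Int), (0 : Int)) = ((1 : Int), (1 : Int) - 1) from by norm_num,
      List.foldl_append, List.foldl_cons, List.foldl_nil]
    have key : (List.foldl pvStepA ((1 : Int), max (1 : Int) 1) (pvPairs (t ++ [x]))).2
        = (pvStepB (List.foldl pvStepB ((1 : Int), (1 : Int) - 1) (pvCuts 1 (pvPairs (t ++ [x]))))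
            (((t ++ [x]).length : Nat) : Int)).1 := by
      simp only [pvStepB]
      rw [h2, h3]
      omega
    rw [key]
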